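-- pv_equiv track=rewrite | github.com/TKontu/knowledge_extraction | src/services/reports/service.py | _build_entity_table
-- ===== SOURCE A (Python) =====
-- def _build_entity_table(
--
--     entity_type: str,
--     entities_by_group: dict[str, dict[str, list[dict]]],
-- ) -> str:
--     """Build markdown table from entity data.
--
--     Args:
--         entity_type: Type of entity (e.g., "limit", "pricing")
--         entities_by_group: Dict of group -> type -> entities
--
--     Returns:
--         Markdown table string
--     """
--     # Collect all unique entity values (rows)
--     all_values: set[str] = set()
--     for _group, types in entities_by_group.items():
--         if entity_type in types:
--             for ent in types[entity_type]:
--                 all_values.add(ent["value"])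
--
--     if not all_values:
--         return ""
--
--     # Build table header
--     groups = list(entities_by_group.keys())
--     header = "| Entity | " + " | ".join(groups) + " |"
--     separator = "|--------|" + "|".join(["--------"] * len(groups)) + "|"
--
--     # Build table rows
--     rows = []
--     for value in sorted(all_values):
--         row_data = [value]
--         for group in groups:
--             # Find matching entity in this group
--             found = False
--             if entity_type in entities_by_group.get(group, {}):
--                 for ent in entities_by_group[group][entity_type]:
--                     if ent["value"] == value:
--                         row_data.append("Yes")
--                         found = True
--                         break
--             if not found:
--                 row_data.append("N/A")
--
--         rows.append("| " + " | ".join(row_data) + " |")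
--
--     return "\n".join([header, separator] + rows)
-- ===== SOURCE B (Python) =====
-- def _build_entity_table(
--     entity_type: str,
--     entities_by_group: dict[str, dict[str, list[dict]]],
-- ) -> str:
--     """Build markdown table from entity data (inverted-index re-implementation).
--
--     One pass over all entities builds presence: value -> set of group names
--     containing it; rows are then emitted by O(1) set-membership lookups,
--     replacing A's separate all-values pass and per-cell rescans of the
--     entity lists.
--     """
--     presence: dict[str, set[str]] = {}
--     for group, types in entities_by_group.items():
--         if entity_type in types:
--             for ent in types[entity_type]:
--                 presence.setdefault(ent["value"], set()).add(group)
--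
--     if not presence:
--         return ""
--
--     groups = list(entities_by_group.keys())
--     header = "| Entity | " + " | ".join(groups) + " |"
--     separator = "|--------|" + "|".join(["--------"] * len(groups)) + "|"
--
--     lines = [header, separator]
--     for value in sorted(presence):
--         cells = ["Yes" if group in presence[value] else "N/A" for group in groups]
--         lines.append("| " + " | ".join([value] + cells) + " |")
--     return "\n".join(lines)
-- ===== Notes on version B (the rewrite author's own statement) =====
-- stated objective: simpler
-- what changed: One pass over all entities builds an inverted index value -> set of containing groups (subsuming A's separate all-values collection), and each table cell becomes a single set-membership lookup instead of A's per-cell re-lookup and linear rescan of the group's entity list.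
import Mathlib
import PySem

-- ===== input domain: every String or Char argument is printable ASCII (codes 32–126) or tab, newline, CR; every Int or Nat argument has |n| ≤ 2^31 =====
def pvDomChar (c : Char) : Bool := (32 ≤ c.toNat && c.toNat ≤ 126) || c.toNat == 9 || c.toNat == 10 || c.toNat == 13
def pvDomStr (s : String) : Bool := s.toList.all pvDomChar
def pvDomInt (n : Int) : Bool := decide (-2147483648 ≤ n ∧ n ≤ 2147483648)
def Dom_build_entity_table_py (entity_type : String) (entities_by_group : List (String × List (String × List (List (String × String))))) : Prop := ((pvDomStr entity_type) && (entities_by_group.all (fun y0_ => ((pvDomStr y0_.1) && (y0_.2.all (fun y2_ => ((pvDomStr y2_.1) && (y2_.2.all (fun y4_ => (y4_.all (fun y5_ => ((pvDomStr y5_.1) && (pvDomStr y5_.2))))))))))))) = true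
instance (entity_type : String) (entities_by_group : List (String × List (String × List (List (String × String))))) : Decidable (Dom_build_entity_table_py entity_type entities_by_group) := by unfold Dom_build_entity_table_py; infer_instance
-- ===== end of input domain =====

-- B replaces A's separate all-values pass and per-cell rescans by one pass building an
-- inverted index value → set of containing groups; cells become set-membership lookups (objective: simpler).

-- Shared dict-as-assoc-list first-match lookup (the type convention's dict lookup).
def pvLookup {β : Type} (l : List (String × β)) (k : String) : Option β :=
  match l with
  | [] => none
  | p :: rest => if p.1 == k then some p.2 else pvLookup rest k

-- ent["value"] (Pre_ guarantees the key is present on every accessed entity)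
def pvEntValue (ent : List (String × String)) : String :=
  (pvLookup ent "value").getD ""

-- ===== PORT A =====
-- A's first loop: 'for _group, types in …: if entity_type in types: for ent …: all_values.add(ent["value"])'
def pvAValues (entity_type : String) (l : List (String × List (String × List (List (String × String)))))
    (s : PySem.Set String) : PySem.Set String :=
  match l with
  | [] => s
  | p :: rest => pvAValues entity_type rest
      (match pvLookup p.2 entity_type with
       | some ents => ents.foldl (fun s ent => PySem.Set.add s (pvEntValue ent)) s
       | none => s)

-- the inner 'for ent …: if ent["value"] == value: append "Yes"; found = True; break' scan
def pvScanA (ents : List (List (String × String))) (value : String) : Bool :=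
  match ents with
  | [] => false
  | ent :: rest => if pvEntValue ent == value then true else pvScanA rest value

-- one cell of a row: the 'entities_by_group.get(group, {})' re-lookup plus the scan
def pvCellA (entity_type : String) (entities_by_group : List (String × List (String × List (List (String × String))))) (group value : String) : String :=
  match pvLookup entities_by_group group with
  | none => "N/A"
  | some types =>
    match pvLookup types entity_type with
    | none => "N/A"
    | some ents => if pvScanA ents value then "Yes" else "N/A"

def build_entity_table_py (entity_type : String) (entities_by_group : List (String × List (String × List (List (String × String))))) : String :=
  let all_values := pvAValues entity_type entities_by_group PySem.Set.empty
  if all_values.isEmpty then ""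
  else
    let groups := entities_by_group.map Prod.fst
    let header := "| Entity | " ++ PySem.Str.join " | " groups ++ " |"
    let separator := "|--------|" ++ PySem.Str.join "|" (List.replicate groups.length "--------") ++ "|"
    let rows := (PySem.List.sorted all_values (fun x => x) false).foldl
      (fun rows value =>
        let row_data := groups.foldl
          (fun rd group => rd ++ [pvCellA entity_type entities_by_group group value]) [value]
        rows ++ ["| " ++ PySem.Str.join " | " row_data ++ " |"]) []
    PySem.Str.join "\n" ([header, separator] ++ rows)

-- ===== PORT B =====
-- B's single pass: 'for group, types …: if entity_type in types: for ent …: presence.setdefault(ent["value"], set()).add(group)'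
def pvBPresence (entity_type : String) (l : List (String × List (String × List (List (String × String)))))
    (d : PySem.Dict String (PySem.Set String)) : PySem.Dict String (PySem.Set String) :=
  match l with
  | [] => d
  | p :: rest => pvBPresence entity_type rest
      (match pvLookup p.2 entity_type with
       | some ents => ents.foldl (fun d ent =>
           d.modify (pvEntValue ent) PySem.Set.empty (fun s => PySem.Set.add s p.1)) d
       | none => d)

def build_entity_table_py_alt (entity_type : String) (entities_by_group : List (String × List (String × List (List (String × String))))) : String :=
  let presence := pvBPresence entity_type entities_by_group PySem.Dict.empty
  if presence.size == 0 then ""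
  else
    let groups := entities_by_group.map Prod.fst
    let header := "| Entity | " ++ PySem.Str.join " | " groups ++ " |"
    let separator := "|--------|" ++ PySem.Str.join "|" (List.replicate groups.length "--------") ++ "|"
    let rows := (PySem.List.sorted presence.keys (fun x => x) false).map
      (fun value => "| " ++ PySem.Str.join " | "
        (value :: groups.map (fun group =>
          if PySem.Set.contains (presence.getD value PySem.Set.empty) group then "Yes" else "N/A")) ++ " |")
    PySem.Str.join "\n" (header :: separator :: rows)

-- ===== PRECONDITION & SPEC =====
-- Pre_ excludes (a) association lists with duplicate group keys or duplicate type keys or a duplicate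
-- key inside an accessed entity — such lists do not represent a Python dict faithfully (Python keeps
-- the last duplicate, the convention's first-match lookup the first) — and (b) inputs where an accessed
-- entity lacks the "value" key, on which A raises KeyError.
def Pre_build_entity_table_py (entity_type : String) (entities_by_group : List (String × List (String × List (List (String × String))))) : Prop :=
  (entities_by_group.map Prod.fst).Nodup ∧
  ∀ p ∈ entities_by_group, (p.2.map Prod.fst).Nodup ∧
    ∀ q ∈ p.2, q.1 = entity_type →
      ∀ ent ∈ q.2, (ent.map Prod.fst).Nodup ∧ "value" ∈ ent.map Prod.fst
instance (entity_type : String) (entities_by_group : List (String × List (String × List (List (String × String))))) : Decidable (Pre_build_entity_table_py entity_type entities_by_group) := by unfold Pre_build_entity_table_py; infer_instance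

def pvWitness_build_entity_table_py : String × (List (String × List (String × List (List (String × String))))) :=
  ("limit", [("g1", [("limit", [[("value", "10")], [("value", "20")]])]), ("g2", [("limit", [[("value", "10")]])])])

def Spec_build_entity_table_py (entity_type : String) (entities_by_group : List (String × List (String × List (List (String × String))))) (out : String) : Prop := out = build_entity_table_py_alt entity_type entities_by_group
instance (entity_type : String) (entities_by_group : List (String × List (String × List (List (String × String))))) (out : String) : Decidable (Spec_build_entity_table_py entity_type entities_by_group out) := by unfold Spec_build_entity_table_py; infer_instance

-- ===== CLAIM (what is proved, stated in full; the proofs are below) =====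
def Claim_equal_build_entity_table_py : Prop := ∀ (entity_type : String) (entities_by_group : List (String × List (String × List (List (String × String))))), Dom_build_entity_table_py entity_type entities_by_group → Pre_build_entity_table_py entity_type entities_by_group → Spec_build_entity_table_py entity_type entities_by_group (build_entity_table_py entity_type entities_by_group)

-- ===== LEMMAS AND PROOFS =====

-- the stream of entity values one pair (group, types) contributes, in traversal order
def pvVals (entity_type : String) (p : String × List (String × List (List (String × String)))) : List String :=
  match pvLookup p.2 entity_type with
  | some ents => ents.map pvEntValue
  | none => []

theorem pvScanA_eq (ents : List (List (String × String))) (v : String) :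
    pvScanA ents v = (ents.map pvEntValue).contains v := by
  induction ents with
  | nil => rfl
  | cons e rest ih =>
    by_cases h : pvEntValue e = v
    · simp [pvScanA, h]
    · have h1 : (pvEntValue e == v) = false := by simp [h]
      simp only [pvScanA, h1, ih, List.map, List.contains_cons]
      simp [Ne.symm h]

theorem pvLookup_of_mem {β : Type} {l : List (String × β)} {p : String × β}
    (hnd : (l.map Prod.fst).Nodup) (hp : p ∈ l) : pvLookup l p.1 = some p.2 := by
  induction l with
  | nil => cases hp
  | cons q rest ih =>
    rw [List.map_cons, List.nodup_cons] at hnd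
    rcases List.mem_cons.1 hp with rfl | hmem
    · simp [pvLookup]
    · have hne : q.1 ≠ p.1 := by
        intro hq
        exact hnd.1 (hq ▸ List.mem_map_of_mem hmem)
      simp [pvLookup, beq_iff_eq, hne, ih hnd.2 hmem]

theorem pvMem_eq_of_nodup_fst {β : Type} {l : List (String × β)} {p q : String × β}
    (hnd : (l.map Prod.fst).Nodup) (hp : p ∈ l) (hq : q ∈ l) (h : p.1 = q.1) : p = q := by
  induction l with
  | nil => cases hp
  | cons r rest ih =>
    rw [List.map_cons, List.nodup_cons] at hnd
    rcases List.mem_cons.1 hp with rfl | hp2 <;> rcases List.mem_cons.1 hq with rfl | hq2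
    · rfl
    · have hm : q.1 ∈ rest.map Prod.fst := List.mem_map_of_mem hq2
      rw [← h] at hm
      exact absurd hm hnd.1
    · have hm : p.1 ∈ rest.map Prod.fst := List.mem_map_of_mem hp2
      rw [h] at hm
      exact absurd hm hnd.1
    · exact ih hnd.2 hp2 hq2

-- the inner entity loop of A, as a Set.update
theorem pvInnerA_eq (ents : List (List (String × String))) (s : PySem.Set String) :
    ents.foldl (fun s ent => PySem.Set.add s (pvEntValue ent)) s
      = PySem.Set.update s (ents.map pvEntValue) := by
  simp [PySem.Set.update, List.foldl_map]

theorem pvAValues_eq (et : String) (l : List (String × List (String × List (List (String × String)))))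
    (s : PySem.Set String) :
    pvAValues et l s = PySem.Set.update s (l.flatMap (pvVals et)) := by
  induction l generalizing s with
  | nil => rfl
  | cons p rest ih =>
    simp only [pvAValues, List.flatMap_cons]
    rcases h : pvLookup p.2 et with _ | ents
    · simp only [ih, pvVals, h, List.nil_append]
    · simp only [ih, pvInnerA_eq, pvVals, h, PySem.Set.update, List.foldl_append]

theorem pvBPresence_keys (et : String) (l : List (String × List (String × List (List (String × String)))))
    (d : PySem.Dict String (PySem.Set String)) :
    (pvBPresence et l d).keys = PySem.Set.update d.keys (l.flatMap (pvVals et)) := by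
  induction l generalizing d with
  | nil => rfl
  | cons p rest ih =>
    simp only [pvBPresence, List.flatMap_cons]
    rcases h : pvLookup p.2 et with _ | ents
    · simp only [ih, pvVals, h, List.nil_append]
    · rw [ih, PySem.Dict.keys_foldl_modify_key ents pvEntValue PySem.Set.empty
          (fun d ent s => PySem.Set.add s p.1) d]
      simp only [pvVals, h, PySem.Set.update, List.foldl_append]

-- the inner entity loop of B: membership in one value's group set
theorem pvInnerB_mem (ents : List (List (String × String))) (g v g2 : String)
    (d : PySem.Dict String (PySem.Set String)) :
    g2 ∈ (ents.foldl (fun d ent =>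
        d.modify (pvEntValue ent) PySem.Set.empty (fun s => PySem.Set.add s g)) d).getD v PySem.Set.empty
      ↔ g2 ∈ d.getD v PySem.Set.empty ∨ (g2 = g ∧ v ∈ ents.map pvEntValue) := by
  induction ents generalizing d with
  | nil => simp
  | cons e rest ih =>
    simp only [List.foldl_cons, ih, PySem.Dict.getD_modify, List.map, List.mem_cons]
    by_cases h : v = pvEntValue e
    · subst h
      simp only [if_true, PySem.Set.mem_add, true_or, and_true]
      tauto
    · rw [if_neg h]
      tauto

theorem pvBPresence_mem (et : String) (l : List (String × List (String × List (List (String × String)))))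
    (d : PySem.Dict String (PySem.Set String)) (v g : String) :
    g ∈ (pvBPresence et l d).getD v PySem.Set.empty ↔
      g ∈ d.getD v PySem.Set.empty ∨ ∃ p ∈ l, p.1 = g ∧ v ∈ pvVals et p := by
  induction l generalizing d with
  | nil => simp [pvBPresence]
  | cons p rest ih =>
    simp only [pvBPresence, List.mem_cons]
    rcases h : pvLookup p.2 et with _ | ents
    · rw [ih]
      have hv : pvVals et p = [] := by simp [pvVals, h]
      constructor
      · rintro (hd | ⟨q, hq, hq2⟩)
        · exact Or.inl hd
        · exact Or.inr ⟨q, Or.inr hq, hq2⟩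
      · rintro (hd | ⟨q, (rfl | hq), hq2⟩)
        · exact Or.inl hd
        · exact absurd hq2.2 (by simp [hv])
        · exact Or.inr ⟨q, hq, hq2⟩
    · rw [ih, pvInnerB_mem]
      have hv : pvVals et p = ents.map pvEntValue := by simp [pvVals, h]
      constructor
      · rintro ((hd | hpv) | ⟨q, hq, hq2⟩)
        · exact Or.inl hd
        · exact Or.inr ⟨p, Or.inl rfl, hpv.1.symm, by rw [hv]; exact hpv.2⟩
        · exact Or.inr ⟨q, Or.inr hq, hq2⟩
      · rintro (hd | ⟨q, (rfl | hq), hq2⟩)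
        · exact Or.inl (Or.inl hd)
        · exact Or.inl (Or.inr ⟨hq2.1.symm, by rw [← hv]; exact hq2.2⟩)
        · exact Or.inr ⟨q, hq, hq2⟩

theorem pvDict_size_eq_keys_length {κ ν : Type} [BEq κ] (d : PySem.Dict κ ν) :
    PySem.Dict.size d = d.keys.length := by
  simp [PySem.Dict.size, PySem.Dict.keys]

-- the two cell computations agree on every value, for a group actually in the table
theorem pvCell_eq (et : String) (ebg : List (String × List (String × List (List (String × String)))))
    (hnd : (ebg.map Prod.fst).Nodup) (p : String × List (String × List (List (String × String))))
    (hp : p ∈ ebg) (v : String) :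
    pvCellA et ebg p.1 v =
      if PySem.Set.contains ((pvBPresence et ebg PySem.Dict.empty).getD v PySem.Set.empty) p.1
      then "Yes" else "N/A" := by
  have hmem : PySem.Set.contains ((pvBPresence et ebg PySem.Dict.empty).getD v PySem.Set.empty) p.1 = true
      ↔ v ∈ pvVals et p := by
    rw [show (PySem.Set.contains ((pvBPresence et ebg PySem.Dict.empty).getD v PySem.Set.empty) p.1 = true)
        ↔ p.1 ∈ (pvBPresence et ebg PySem.Dict.empty).getD v PySem.Set.empty from by simp [PySem.Set.contains]]
    rw [pvBPresence_mem]
    constructor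
    · rintro (hd | ⟨q, hq, hq1, hq2⟩)
      · simp [PySem.Dict.getD_empty, PySem.Set.empty] at hd
      · have hqp : q = p := pvMem_eq_of_nodup_fst hnd hq hp hq1
        exact hqp ▸ hq2
    · intro hv
      exact Or.inr ⟨p, hp, rfl, hv⟩
  rcases h : pvLookup p.2 et with _ | ents
  · have hnv : ¬ v ∈ pvVals et p := by simp [pvVals, h]
    have hc : PySem.Set.contains ((pvBPresence et ebg PySem.Dict.empty).getD v PySem.Set.empty) p.1 = false := by
      cases hc : PySem.Set.contains ((pvBPresence et ebg PySem.Dict.empty).getD v PySem.Set.empty) p.1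
      · rfl
      · exact absurd (hmem.1 hc) hnv
    simp only [pvCellA, pvLookup_of_mem hnd hp, h, hc, Bool.false_eq_true, if_false]
  · have hv : pvVals et p = ents.map pvEntValue := by simp [pvVals, h]
    by_cases hvm : v ∈ pvVals et p
    · have hc : PySem.Set.contains ((pvBPresence et ebg PySem.Dict.empty).getD v PySem.Set.empty) p.1 = true :=
        hmem.2 hvm
      have hs : (ents.map pvEntValue).contains v = true := by
        rw [← hv]; simpa using hvm
      simp only [pvCellA, pvLookup_of_mem hnd hp, h, hc, pvScanA_eq, hs, if_true]
    · have hc : PySem.Set.contains ((pvBPresence et ebg PySem.Dict.empty).getD v PySem.Set.empty) p.1 = false := by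
        cases hc : PySem.Set.contains ((pvBPresence et ebg PySem.Dict.empty).getD v PySem.Set.empty) p.1
        · rfl
        · exact absurd (hmem.1 hc) hvm
      have hs : (ents.map pvEntValue).contains v = false := by
        rw [← hv]; simpa using hvm
      simp only [pvCellA, pvLookup_of_mem hnd hp, h, hc, pvScanA_eq, hs, Bool.false_eq_true, if_false]

-- ===== VERDICT (by name: the statement is the Claim_ definition above) =====
theorem build_entity_table_py_spec : Claim_equal_build_entity_table_py := by
  intro et ebg _hdom hpre
  unfold Spec_build_entity_table_py
  simp only [build_entity_table_py, build_entity_table_py_alt]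
  have hkeys : (pvBPresence et ebg PySem.Dict.empty).keys = pvAValues et ebg PySem.Set.empty := by
    rw [pvBPresence_keys, pvAValues_eq, PySem.Dict.keys_empty]
    rfl
  have hsize : (PySem.Dict.size (pvBPresence et ebg PySem.Dict.empty) == 0)
      = (pvAValues et ebg PySem.Set.empty).isEmpty := by
    rw [pvDict_size_eq_keys_length, hkeys]
    rcases pvAValues et ebg PySem.Set.empty with _ | ⟨a, s⟩ <;> simp
  rw [hsize, hkeys]
  by_cases hempty : (pvAValues et ebg PySem.Set.empty).isEmpty = true
  · rw [if_pos hempty, if_pos hempty]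
  · rw [if_neg hempty, if_neg hempty]
    rw [PySem.List.foldl_append_singleton_eq_map, List.nil_append]
    simp only [List.cons_append, List.nil_append]
    refine congrArg (PySem.Str.join "\n") ?_
    refine congrArg (fun t => _ :: _ :: t) ?_
    apply List.map_congr_left
    intro v _
    rw [PySem.List.foldl_append_singleton_eq_map, List.singleton_append]
    refine congrArg (fun t => "| " ++ PySem.Str.join " | " t ++ " |") ?_
    refine congrArg (fun t => v :: t) ?_
    apply List.map_congr_left
    intro g hg
    rcases List.mem_map.1 hg with ⟨p, hp, rfl⟩
    exact pvCell_eq et ebg hpre.1 p hp v
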